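-- pv_equiv track=rewrite | github.com/highly-illogical/advent-of-code | 2024/day21_keypad_conundrum/solution.py | dapply_memoized
-- ===== SOURCE A (Python) =====
-- def dapply_memoized(s):
--     groups = []
--     current = ""
--     a_found = False
--     for i in range(len(s)):
--         if s[i] == "A":
--             a_found = True
--         if a_found and s[i] != "A":
--             a_found = False
--             groups.append(current)
--             current = ""
--         current = current + s[i]
--     groups.append(current)
--     return groups
-- ===== SOURCE B (Python) =====
-- def dapply_memoized(s):
--     # Build the groups back-to-front: scan the string in reverse, growing the
--     # current group as a reversed buffer; a char 'A' seen just before a group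
--     # starting with a non-'A' char closes the buffer and opens a new group.
--     out = []
--     cur = []
--     for c in reversed(s):
--         if c == "A" and cur and cur[-1] != "A":
--             out.append("".join(reversed(cur)))
--             cur = [c]
--         else:
--             cur.append(c)
--     out.append("".join(reversed(cur)))
--     out.reverse()
--     return out
-- ===== Notes on version B (the rewrite author's own statement) =====
-- stated objective: alternative
-- what changed: Replaces A's forward scan with an a_found flag and per-char string concatenation by a reverse scan that builds the groups back-to-front into a reversed list buffer (boundary decided from the buffer's last char), joining each group once.
import Mathlib
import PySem

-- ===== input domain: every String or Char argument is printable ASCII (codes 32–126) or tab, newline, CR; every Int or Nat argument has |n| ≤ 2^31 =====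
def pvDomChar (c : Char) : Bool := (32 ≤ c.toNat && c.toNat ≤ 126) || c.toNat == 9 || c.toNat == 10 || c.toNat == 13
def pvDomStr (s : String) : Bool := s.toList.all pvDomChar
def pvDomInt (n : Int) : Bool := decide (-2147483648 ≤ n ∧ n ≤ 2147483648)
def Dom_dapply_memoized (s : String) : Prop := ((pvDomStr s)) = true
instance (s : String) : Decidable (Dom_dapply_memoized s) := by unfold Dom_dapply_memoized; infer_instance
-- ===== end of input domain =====

-- B builds the groups back-to-front from a reverse scan (lookahead on the group being
-- built) instead of A's forward scan with an 'a_found' flag; objective: alternative.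

-- ===== PORT A =====
-- forward loop over the chars; state = (groups, current, a_found), exactly as in A
def pvLoopA : List Char → List (List Char) → List Char → Bool → List (List Char)
  | [], groups, current, _ => groups ++ [current]
  | c :: rest, groups, current, aFound =>
    let aFound1 := if c = 'A' then true else aFound
    if aFound1 = true ∧ ¬(c = 'A') then
      pvLoopA rest (groups ++ [current]) [c] false
    else
      pvLoopA rest groups (current ++ [c]) aFound1

def dapply_memoized (s : String) : List String :=
  (pvLoopA s.toList [] [] false).map (fun g => String.ofList g)

-- ===== PORT B =====
-- one step of B's reverse loop: st = (finished groups, last-to-first; current group, reversed)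
def pvStepB2 (st : List (List Char) × List Char) (c : Char) : List (List Char) × List Char :=
  if c = 'A' ∧ st.2 ≠ [] ∧ st.2.getLast? ≠ some 'A' then (st.1 ++ [st.2.reverse], [c])
  else (st.1, st.2 ++ [c])

def dapply_memoized_alt (s : String) : List String :=
  let st := (s.toList.reverse).foldl pvStepB2 ([], [])
  ((st.1 ++ [st.2.reverse]).reverse).map (fun g => String.ofList g)

-- ===== PRECONDITION & SPEC =====
def Spec_dapply_memoized (s : String) (out : List String) : Prop := out = dapply_memoized_alt s
instance (s : String) (out : List String) : Decidable (Spec_dapply_memoized s out) := by unfold Spec_dapply_memoized; infer_instance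

-- ===== CLAIM (what is proved, stated in full; the proofs are below) =====
def Claim_equal_dapply_memoized : Prop := ∀ (s : String), Dom_dapply_memoized s → Spec_dapply_memoized s (dapply_memoized s)

-- ===== LEMMAS AND PROOFS =====

-- proof-only reference: the groups of a suffix, first group in front (what B's reverse
-- loop has built, read front-to-back)
def pvStepB (c : Char) (acc : List (List Char)) : List (List Char) :=
  match acc with
  | [] => [[c]]
  | g :: gs => if c = 'A' ∧ g ≠ [] ∧ g.head? ≠ some 'A' then [c] :: g :: gs else (c :: g) :: gs

-- is there a group boundary just before this suffix? (the suffix starts with a non-'A')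
def pvBdry : List Char → Bool
  | [] => false
  | c :: _ => decide (¬ (c = 'A'))

-- B's fold always yields a nonempty list whose first group starts with the first char
lemma pvFoldr_head (l : List Char) :
    ∃ g gs, l.foldr pvStepB [[]] = g :: gs ∧ g.head? = l.head? := by
  induction l with
  | nil => exact ⟨[], [], rfl, rfl⟩
  | cons c r ih =>
    obtain ⟨g, gs, h, _⟩ := ih
    simp only [List.foldr, h, pvStepB]
    split_ifs with hcond
    · exact ⟨[c], g :: gs, rfl, rfl⟩
    · exact ⟨c :: g, gs, rfl, rfl⟩

lemma pvLoopA_eq (l : List Char) : ∀ (groups : List (List Char)) (current : List Char) (aFound : Bool),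
    pvLoopA l groups current aFound =
      groups ++ (if aFound = true ∧ pvBdry l = true
        then current :: l.foldr pvStepB [[]]
        else (l.foldr pvStepB [[]]).modifyHead (fun g => current ++ g)) := by
  induction l with
  | nil =>
    intro groups current aFound
    simp [pvLoopA, pvBdry]
  | cons c rest ih =>
    intro groups current aFound
    obtain ⟨g, gs, hR, hg⟩ := pvFoldr_head rest
    by_cases hc : c = 'A'
    · subst hc
      -- a_found becomes true; no cut before this char
      have h1 : pvLoopA ('A' :: rest) groups current aFound
          = pvLoopA rest groups (current ++ ['A']) true := by
        simp [pvLoopA]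
      rw [h1, ih]
      simp only [List.foldr, hR, pvStepB, pvBdry]
      cases rest with
      | nil =>
        have hgnil : g = [] := by simpa using hg
        subst hgnil
        simp
      | cons d r =>
        have hgd : g.head? = some d := hg
        have hgne : g ≠ [] := by intro h; subst h; simp at hgd
        by_cases hd : d = 'A'
        · subst hd
          simp [hgd, hgne]
        · simp [hd, hgd, hgne]
    · by_cases ha : aFound = true
      · -- cut: close current, start a new group with c
        have h1 : pvLoopA (c :: rest) groups current aFound
            = pvLoopA rest (groups ++ [current]) [c] false := by
          simp [pvLoopA, hc, ha]
        rw [h1, ih]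
        simp [List.foldr, hR, pvStepB, hc, pvBdry, ha]
      · have ha' : aFound = false := by cases aFound <;> simp_all
        subst ha'
        have h1 : pvLoopA (c :: rest) groups current false
            = pvLoopA rest groups (current ++ [c]) false := by
          simp [pvLoopA, hc]
        rw [h1, ih]
        simp [List.foldr, hR, pvStepB, hc, pvBdry]

-- B's reverse foldl is the reference foldr, with the state transposed
lemma pvFoldl2_eq (l : List Char) :
    (l.reverse).foldl pvStepB2 ([], []) =
      (((l.foldr pvStepB [[]]).tail).reverse, ((l.foldr pvStepB [[]]).headI).reverse) := by
  induction l with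
  | nil => rfl
  | cons c r ih =>
    obtain ⟨g, gs, hR, _⟩ := pvFoldr_head r
    simp only [List.reverse_cons, List.foldl_append, List.foldl_cons, List.foldl_nil, ih,
      List.foldr, hR]
    by_cases hcut : c = 'A' ∧ g ≠ [] ∧ g.head? ≠ some 'A'
    · obtain ⟨h1, h2, h3⟩ := hcut
      simp [pvStepB2, pvStepB, h1, h2, h3]
    · have hcut' : ¬ (c = 'A' ∧ g.reverse ≠ [] ∧ g.reverse.getLast? ≠ some 'A') := by
        simpa using hcut
      simp [pvStepB2, pvStepB, hcut]

lemma pv_eq (s : String) : dapply_memoized s = dapply_memoized_alt s := by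
  unfold dapply_memoized dapply_memoized_alt
  rw [pvLoopA_eq, pvFoldl2_eq]
  have h := pvFoldr_head s.toList
  obtain ⟨g, gs, hR, _⟩ := h
  simp [hR]

-- ===== VERDICT (by name: the statement is the Claim_ definition above) =====
theorem dapply_memoized_spec : Claim_equal_dapply_memoized := by
  intro s _
  unfold Spec_dapply_memoized
  exact pv_eq s
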